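-- pv_equiv track=rewrite | github.com/Danielbgoncalves/bus_transfer_optimization_GA | BusNet/model/route.py | reconstruct_path_structure_v1
-- ===== SOURCE A (Python) =====
-- from collections import defaultdict
--
-- def reconstruct_path_structure_v1(path_nodes, link_to_routes):
--     """
--     Reconstrói as rotas minimizando o número de transferências (Look-Ahead).
--     Escolhe a rota que cobre o maior segmento contínuo do caminho restante.
--     """
--     if not path_nodes or len(path_nodes) < 2:
--         return [], {}
--
--     used_routes_list = []
--     paths_dict = defaultdict(list)
--
--     # Índice atual no caminho de nós
--     current_idx = 0
--     total_nodes = len(path_nodes)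
--
--     while current_idx < total_nodes - 1:
--         u, v = path_nodes[current_idx], path_nodes[current_idx + 1]
--
--         # 1. Identificar todas as rotas que cobrem o link atual
--         candidates = link_to_routes.get((u, v), [])
--
--         if not candidates:
--             # Se não há rota para este link, o caminho é inviável na rede de rotas atual
--             return [], {}
--
--         # 2. SELEÇÃO "LOOK-AHEAD": Qual candidato vai mais longe?
--         best_route = None
--         max_length = -1
--
--         # Se já estamos numa rota e ela serve o próximo link, tendemos a mantê-la
--         # (histerese para evitar trocas desnecessárias se o empate for perfeito)
--         current_route_in_use = used_routes_list[-1] if used_routes_list else None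
--
--         for route_id in candidates:
--             # Verifica quantos links consecutivos essa rota consegue cobrir
--             length = 0
--             temp_idx = current_idx
--
--             while temp_idx < total_nodes - 1:
--                 curr_u, curr_v = path_nodes[temp_idx], path_nodes[temp_idx + 1]
--                 # Verifica se a rota 'route_id' cobre o link (curr_u, curr_v)
--                 if route_id in link_to_routes.get((curr_u, curr_v), []):
--                     length += 1
--                     temp_idx += 1
--                 else:
--                     break
--
--             # Critério de desempate: se o comprimento for igual, prefira a rota já em uso
--             if length > max_length:
--                 max_length = length
--                 best_route = route_id
--             elif length == max_length and route_id == current_route_in_use: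
--                 best_route = route_id
--
--         # 3. Registrar a melhor rota encontrada
--         # Se mudamos de rota em relação ao passo anterior, adicionamos à lista sequencial
--         if not used_routes_list or used_routes_list[-1] != best_route:
--             used_routes_list.append(best_route)
--
--         # 4. "Consumir" os links que essa rota cobriu
--         # Adiciona os links ao dicionário da rota e avança o índice principal
--         for _ in range(max_length):
--             u_next = path_nodes[current_idx]
--             v_next = path_nodes[current_idx + 1]
--             paths_dict[best_route].append((u_next, v_next))
--             current_idx += 1
--
--     return used_routes_list, dict(paths_dict)
-- ===== SOURCE B (Python) =====
-- def reconstruct_path_structure_v1(path_nodes, link_to_routes):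
--     """Staged reconstruction: precompute the link list, the per-link candidate lists
--     and a backward reach table (route -> consecutive-cover length) per index; then cut
--     the path into segments with a closed-form selection rule (max + membership test)
--     and finally assemble the route list and the per-route link dict from the segments."""
--     if not path_nodes or len(path_nodes) < 2:
--         return [], {}
--
--     links = list(zip(path_nodes, path_nodes[1:]))
--     cands = [link_to_routes.get(l, []) for l in links]
--
--     # backward pass: reach[i][r] = number of consecutive links from i covered by r
--     reach = []
--     nxt = {}
--     for c in reversed(cands):
--         nxt = {r: nxt.get(r, 0) + 1 for r in c}
--         reach.append(nxt)
--     reach.reverse()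
--
--     # cut the link sequence into greedy look-ahead segments (route, start, length)
--     segments = []
--     i, prev = 0, None
--     while i < len(links):
--         c = cands[i]
--         if not c:
--             return [], {}
--         table = reach[i]
--         m = max(table[r] for r in c)
--         if prev is not None and table.get(prev) == m:
--             best = prev
--         else:
--             best = next(r for r in c if table[r] == m)
--         segments.append((best, i, m))
--         prev = best
--         i += m
--
--     used, paths = [], {}
--     for r, s, m in segments:
--         if not used or used[-1] != r:
--             used.append(r)
--         paths.setdefault(r, []).extend(links[s:s + m])
--     return used, paths
-- ===== Notes on version B (the rewrite author's own statement) =====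
-- stated objective: alternative
-- what changed: B restages A's single interleaved greedy loop (per-candidate inner look-ahead rescans, a hysteresis selection fold, per-link dict appends) as four separate passes: a precomputed link/candidate list, a backward reach-table pass, a segment-cutting loop whose selection is a closed-form max plus membership test with O(1) reach lookups, and a final assembly of the route list and per-route link dict from the segments.
import Mathlib
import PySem

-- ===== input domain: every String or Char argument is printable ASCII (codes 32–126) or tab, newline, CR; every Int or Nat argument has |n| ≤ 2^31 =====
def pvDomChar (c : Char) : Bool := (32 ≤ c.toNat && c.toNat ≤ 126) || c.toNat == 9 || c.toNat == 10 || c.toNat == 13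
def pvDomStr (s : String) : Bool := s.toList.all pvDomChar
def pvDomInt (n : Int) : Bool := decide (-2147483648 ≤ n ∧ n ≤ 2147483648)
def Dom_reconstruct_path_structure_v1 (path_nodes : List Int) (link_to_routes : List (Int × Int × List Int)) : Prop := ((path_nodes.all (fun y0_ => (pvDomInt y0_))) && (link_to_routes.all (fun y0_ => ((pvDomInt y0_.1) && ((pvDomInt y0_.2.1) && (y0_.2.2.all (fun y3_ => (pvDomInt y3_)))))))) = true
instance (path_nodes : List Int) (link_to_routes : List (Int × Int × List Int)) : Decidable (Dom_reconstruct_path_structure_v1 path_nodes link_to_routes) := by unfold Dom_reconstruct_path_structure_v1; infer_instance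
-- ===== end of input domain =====

-- B replaces A's interleaved greedy loop (per-candidate inner look-ahead rescans, hysteresis
-- fold, per-link dict appends) by four staged passes: link/candidate lists, a backward reach
-- table, a segment-cutting loop with a closed-form max+membership selection, and a final
-- assembly of the outputs from the segments; objective: alternative decomposition.

-- shared representation of the Python dict argument `link_to_routes`:
-- built once from the association list exactly as Python's dict construction (later key wins).
def pvLtrDict (link_to_routes : List (Int × Int × List Int)) : PySem.Dict (Int × Int) (List Int) :=
  PySem.Dict.ofList (link_to_routes.map (fun e => ((e.1, e.2.1), e.2.2)))

-- ===== PORT A =====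

-- A's inner `while temp_idx < total_nodes - 1` look-ahead scan for one candidate route.
-- path indexing is always in range here (temp < n-1 ≤ len-1); pyGetD's default is never used.
def pvScanA (path : List Int) (ltrd : PySem.Dict (Int × Int) (List Int)) (n : Nat) (rid : Int) (temp : Nat) : Int :=
  if h : temp < n - 1 then
    if rid ∈ ltrd.getD (PySem.List.pyGetD path (temp : Int) 0, PySem.List.pyGetD path ((temp : Int) + 1) 0) [] then
      1 + pvScanA path ltrd n rid (temp + 1)
    else 0
  else 0
termination_by n - temp
decreasing_by omega

-- A's outer `while current_idx < total_nodes - 1` loop; fuel = number of nodes always suffices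
-- (each iteration advances current_idx by max_length ≥ 1).
def pvLoopA (path : List Int) (ltrd : PySem.Dict (Int × Int) (List Int)) (n : Nat) :
    Nat → Nat → List Int → PySem.Dict Int (List (Int × Int)) → List Int × List (Int × List (Int × Int))
  | 0, _, used, paths => (used, paths.items)       -- fuel exhausted: unreachable with fuel = n
  | fuel + 1, idx, used, paths =>
    if idx < n - 1 then
      let u := PySem.List.pyGetD path (idx : Int) 0
      let v := PySem.List.pyGetD path ((idx : Int) + 1) 0
      let candidates := ltrd.getD (u, v) []
      if candidates = [] then ([], [])
      else
        let cur := used.getLast?                    -- used[-1] if used else None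
        let sel := candidates.foldl (fun (bm : Option Int × Int) rid =>
            let length := pvScanA path ltrd n rid idx
            if length > bm.2 then (some rid, length)
            else if length = bm.2 ∧ some rid = cur then (some rid, bm.2)
            else bm) ((none : Option Int), (-1 : Int))
        let best := sel.1.getD 0                    -- sel.1 = some _ here: candidates ≠ []
        let used' := if used = [] ∨ used.getLast? ≠ some best then used ++ [best] else used
        let st := (List.range sel.2.toNat).foldl
            (fun (st : PySem.Dict Int (List (Int × Int)) × Nat) _ =>
              let un := PySem.List.pyGetD path (st.2 : Int) 0
              let vn := PySem.List.pyGetD path ((st.2 : Int) + 1) 0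
              (st.1.modify best [] (· ++ [(un, vn)]), st.2 + 1)) (paths, idx)
        pvLoopA path ltrd n fuel st.2 used' st.1
    else (used, paths.items)

def reconstruct_path_structure_v1 (path_nodes : List Int) (link_to_routes : List (Int × Int × List Int)) : List Int × (List (Int × List (Int × Int))) :=
  if path_nodes = [] ∨ PySem.List.len path_nodes < 2 then ([], [])
  else
    let ltrd := pvLtrDict link_to_routes
    pvLoopA path_nodes ltrd path_nodes.length path_nodes.length 0 [] PySem.Dict.empty

-- ===== PORT B =====

-- the dict comprehension `{r: nxt.get(r, 0) + 1 for r in c}`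
def pvTable (c : List Int) (nxt : PySem.Dict Int Int) : PySem.Dict Int Int :=
  c.foldl (fun d r => d.insert r (nxt.getD r 0 + 1)) PySem.Dict.empty

-- `for c in reversed(cands): nxt = {…}; reach.append(nxt)` then `reach.reverse()`
def pvReachB (cands : List (List Int)) : List (PySem.Dict Int Int) :=
  ((cands.reverse.foldl (fun (st : List (PySem.Dict Int Int) × PySem.Dict Int Int) c =>
      let nxt := pvTable c st.2
      (st.1 ++ [nxt], nxt)) ([], PySem.Dict.empty)).1).reverse

-- B's segment-cutting loop `while i < len(links)`; returns none for the `return [], {}`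
-- case; fuel = len(links)+1 suffices (each iteration advances i by m ≥ 1).
def pvSegs (cands : List (List Int)) (reach : List (PySem.Dict Int Int)) (L : Nat) :
    Nat → Nat → Option Int → Option (List (Int × Nat × Int))
  | 0, _, _ => some []                             -- fuel exhausted: unreachable
  | fuel + 1, i, prev =>
    if i < L then
      let c := cands.getD i []
      if c = [] then none
      else
        let table := reach.getD i PySem.Dict.empty
        let m := (PySem.List.max? (c.map (fun r => table.getD r 0)) (fun x => x)).getD 0
        let best :=
          match prev with
          | some p => if table.get? p = some m then p
                      else (c.find? (fun r => table.getD r 0 == m)).getD 0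
          | none => (c.find? (fun r => table.getD r 0 == m)).getD 0
        match pvSegs cands reach L fuel (i + m.toNat) (some best) with
        | none => none
        | some rest => some ((best, i, m) :: rest)
    else some []

-- `for r, s, m in segments: …` building used (conditional append) and paths (setdefault+extend)
def pvAssemble (links : List (Int × Int)) (segs : List (Int × Nat × Int)) :
    List Int × PySem.Dict Int (List (Int × Int)) :=
  segs.foldl (fun st seg =>
    ((if st.1 = [] ∨ st.1.getLast? ≠ some seg.1 then st.1 ++ [seg.1] else st.1),
     st.2.modify seg.1 [] (· ++ PySem.List.slice links (some (seg.2.1 : Int)) (some ((seg.2.1 : Int) + seg.2.2)))))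
    ([], PySem.Dict.empty)

def reconstruct_path_structure_v1_alt (path_nodes : List Int) (link_to_routes : List (Int × Int × List Int)) : List Int × (List (Int × List (Int × Int))) :=
  if path_nodes = [] ∨ PySem.List.len path_nodes < 2 then ([], [])
  else
    let ltrd := pvLtrDict link_to_routes
    let links := path_nodes.zip (PySem.List.slice path_nodes (some 1) none)
    let cands := links.map (fun l => ltrd.getD l [])
    let reach := pvReachB cands
    match pvSegs cands reach links.length (links.length + 1) 0 none with
    | none => ([], [])
    | some segs =>
      let st := pvAssemble links segs
      (st.1, st.2.items)

-- ===== PRECONDITION & SPEC =====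
def Spec_reconstruct_path_structure_v1 (path_nodes : List Int) (link_to_routes : List (Int × Int × List Int)) (out : List Int × (List (Int × List (Int × Int)))) : Prop := out = reconstruct_path_structure_v1_alt path_nodes link_to_routes
instance (path_nodes : List Int) (link_to_routes : List (Int × Int × List Int)) (out : List Int × (List (Int × List (Int × Int)))) : Decidable (Spec_reconstruct_path_structure_v1 path_nodes link_to_routes out) := by unfold Spec_reconstruct_path_structure_v1; infer_instance

-- ===== CLAIM (what is proved, stated in full; the proofs are below) =====
def Claim_equal_reconstruct_path_structure_v1 : Prop := ∀ (path_nodes : List Int) (link_to_routes : List (Int × Int × List Int)), Dom_reconstruct_path_structure_v1 path_nodes link_to_routes → Spec_reconstruct_path_structure_v1 path_nodes link_to_routes (reconstruct_path_structure_v1 path_nodes link_to_routes)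

-- ===== LEMMAS AND PROOFS =====

-- names for B's intermediate lists (proof-side abbreviations of alt's `let`s)
def pvLinksOf (path : List Int) : List (Int × Int) :=
  path.zip (PySem.List.slice path (some 1) none)

def pvCandsOf (path : List Int) (ltrd : PySem.Dict (Int × Int) (List Int)) : List (List Int) :=
  (pvLinksOf path).map (fun l => ltrd.getD l [])

-- recursive description of B's backward reach pass
def pvTablesOf : List (List Int) → List (PySem.Dict Int Int)
  | [] => []
  | c :: cs => pvTable c ((pvTablesOf cs).headD PySem.Dict.empty) :: pvTablesOf cs

theorem pvTablesOf_length (cs : List (List Int)) : (pvTablesOf cs).length = cs.length := by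
  induction cs with
  | nil => rfl
  | cons c cs ih => simp [pvTablesOf, ih]

theorem pvReachB_fold (cs : List (List Int)) (acc0 : List (PySem.Dict Int Int)) :
    cs.reverse.foldl (fun (st : List (PySem.Dict Int Int) × PySem.Dict Int Int) c =>
        let nxt := pvTable c st.2
        (st.1 ++ [nxt], nxt)) (acc0, PySem.Dict.empty)
      = (acc0 ++ (pvTablesOf cs).reverse, (pvTablesOf cs).headD PySem.Dict.empty) := by
  induction cs generalizing acc0 with
  | nil => simp [pvTablesOf]
  | cons c cs ih =>
    simp only [List.reverse_cons, List.foldl_append, ih, List.foldl_cons, List.foldl_nil]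
    simp [pvTablesOf]

theorem pvReachB_eq (cs : List (List Int)) : pvReachB cs = pvTablesOf cs := by
  unfold pvReachB
  rw [pvReachB_fold cs []]
  simp

theorem pvTablesOf_drop (cs : List (List Int)) (i : Nat) :
    (pvTablesOf cs).drop i = pvTablesOf (cs.drop i) := by
  induction cs generalizing i with
  | nil => simp [pvTablesOf]
  | cons c cs ih =>
    cases i with
    | zero => rfl
    | succ j => simp [pvTablesOf, ih j]

theorem getD_eq_headD_drop {α : Type} (xs : List α) (i : Nat) (d : α) :
    xs.getD i d = (xs.drop i).headD d := by
  induction xs generalizing i with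
  | nil => simp
  | cons x xs ih =>
    cases i with
    | zero => rfl
    | succ j => simp

theorem pvTablesOf_getD_step (cs : List (List Int)) (i : Nat) (h : i < cs.length) :
    (pvTablesOf cs).getD i PySem.Dict.empty
      = pvTable (cs.getD i []) ((pvTablesOf cs).getD (i + 1) PySem.Dict.empty) := by
  rw [getD_eq_headD_drop (pvTablesOf cs) i, pvTablesOf_drop cs i,
    getD_eq_headD_drop (pvTablesOf cs) (i + 1), pvTablesOf_drop cs (i + 1),
    getD_eq_headD_drop cs i, List.drop_eq_getElem_cons h]
  simp [pvTablesOf, List.getElem?_eq_getElem h]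

-- the dict comprehension builds exactly the per-route successor counts
theorem pvTable_foldl_get? (c : List Int) (nxt : PySem.Dict Int Int) (d : PySem.Dict Int Int) (x : Int) :
    (c.foldl (fun d r => d.insert r (nxt.getD r 0 + 1)) d).get? x
      = if x ∈ c then some (nxt.getD x 0 + 1) else d.get? x := by
  induction c generalizing d with
  | nil => simp
  | cons a c ih =>
    simp only [List.foldl_cons, ih, List.mem_cons]
    by_cases hx : x ∈ c
    · simp [hx]
    · by_cases hxa : x = a
      · subst hxa; simp [hx, PySem.Dict.get?_insert_self]
      · simp [hx, hxa, PySem.Dict.get?_insert_of_ne _ _ hxa]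

theorem pvTable_get? (c : List Int) (nxt : PySem.Dict Int Int) (x : Int) :
    (pvTable c nxt).get? x = if x ∈ c then some (nxt.getD x 0 + 1) else none := by
  unfold pvTable
  rw [pvTable_foldl_get?]
  simp

-- basic facts about A's look-ahead scan
theorem pvScanA_lt (path : List Int) (ltrd : PySem.Dict (Int × Int) (List Int)) (n : Nat) (rid : Int) (temp : Nat)
    (h : temp < n - 1) :
    pvScanA path ltrd n rid temp =
      if rid ∈ ltrd.getD (PySem.List.pyGetD path (temp : Int) 0, PySem.List.pyGetD path ((temp : Int) + 1) 0) [] then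
        1 + pvScanA path ltrd n rid (temp + 1)
      else 0 := by
  rw [pvScanA]; simp [h]

theorem pvScanA_ge (path : List Int) (ltrd : PySem.Dict (Int × Int) (List Int)) (n : Nat) (rid : Int) (temp : Nat)
    (h : ¬ temp < n - 1) : pvScanA path ltrd n rid temp = 0 := by
  rw [pvScanA]; simp [h]

theorem pvScanA_nonneg (path : List Int) (ltrd : PySem.Dict (Int × Int) (List Int)) (n : Nat) (rid : Int) (temp : Nat) :
    0 ≤ pvScanA path ltrd n rid temp := by
  induction temp using pvScanA.induct path ltrd n rid with
  | case1 temp h hm ih => rw [pvScanA_lt _ _ _ _ _ h, if_pos hm]; omega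
  | case2 temp h hm => rw [pvScanA_lt _ _ _ _ _ h, if_neg hm]
  | case3 temp h => rw [pvScanA_ge _ _ _ _ _ h]

theorem pvScanA_le (path : List Int) (ltrd : PySem.Dict (Int × Int) (List Int)) (n : Nat) (rid : Int) (temp : Nat)
    (ht : temp ≤ n - 1) :
    pvScanA path ltrd n rid temp ≤ ((n - 1 : Nat) : Int) - (temp : Int) := by
  revert ht
  induction temp using pvScanA.induct path ltrd n rid with
  | case1 temp h hm ih =>
    intro ht
    rw [pvScanA_lt _ _ _ _ _ h, if_pos hm]
    have h2 := ih (by omega)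
    omega
  | case2 temp h hm => intro ht; rw [pvScanA_lt _ _ _ _ _ h, if_neg hm]; omega
  | case3 temp h => intro ht; rw [pvScanA_ge _ _ _ _ _ h]; omega

-- the link list and the candidate lists read back the path / the dict
theorem pvLinksOf_length (path : List Int) (_h2 : 2 ≤ path.length) :
    (pvLinksOf path).length = path.length - 1 := by
  unfold pvLinksOf
  rw [PySem.List.slice_from_one]
  simp

theorem pvLinksOf_eq (path : List Int) : pvLinksOf path = path.zip path.tail := by
  unfold pvLinksOf; rw [PySem.List.slice_from_one]

theorem pvLinksOf_getElem (path : List Int) (i : Nat) (h : i < path.length - 1) (h2 : 2 ≤ path.length)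
    (hl : i < (pvLinksOf path).length) :
    (pvLinksOf path)[i]
      = (PySem.List.pyGetD path ((i : Nat) : Int) 0, PySem.List.pyGetD path (((i : Nat) : Int) + 1) 0) := by
  simp only [pvLinksOf_eq] at hl ⊢
  rw [List.getElem_zip]
  have h1 : ((i : Nat) : Int) + 1 = (((i + 1 : Nat)) : Int) := by push_cast; ring
  rw [h1, PySem.List.pyGetD_natCast, PySem.List.pyGetD_natCast]
  have hi : i < path.length := by omega
  have hi1 : i + 1 < path.length := by omega
  rw [List.getD_eq_getElem path 0 hi, List.getD_eq_getElem path 0 hi1]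
  congr 1
  rw [List.getElem_tail]

theorem pvCandsOf_getD (path : List Int) (ltrd : PySem.Dict (Int × Int) (List Int)) (i : Nat)
    (h : i < path.length - 1) (h2 : 2 ≤ path.length) :
    (pvCandsOf path ltrd).getD i []
      = ltrd.getD (PySem.List.pyGetD path ((i : Nat) : Int) 0, PySem.List.pyGetD path (((i : Nat) : Int) + 1) 0) [] := by
  unfold pvCandsOf
  have hl : i < (pvLinksOf path).length := by rw [pvLinksOf_length path h2]; omega
  rw [List.getD_eq_getElem _ [] (by simpa using hl), List.getElem_map]
  rw [pvLinksOf_getElem path i h h2 hl]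

-- the reach tables compute A's look-ahead scan
theorem pvTables_getD_scan (path : List Int) (ltrd : PySem.Dict (Int × Int) (List Int)) (h2 : 2 ≤ path.length) :
    ∀ (d : Nat) (i : Nat), i + d = path.length - 1 → ∀ (r : Int),
      ((pvTablesOf (pvCandsOf path ltrd)).getD i PySem.Dict.empty).getD r 0
        = pvScanA path ltrd path.length r i := by
  intro d
  induction d with
  | zero =>
    intro i hi r
    have hlen : (pvTablesOf (pvCandsOf path ltrd)).length = path.length - 1 := by
      rw [pvTablesOf_length]
      unfold pvCandsOf
      rw [List.length_map, pvLinksOf_length path h2]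
    rw [List.getD_eq_default _ _ (by omega), pvScanA_ge _ _ _ _ _ (by omega)]
    rfl
  | succ d ih =>
    intro i hi r
    have hcl : i < (pvCandsOf path ltrd).length := by
      unfold pvCandsOf; rw [List.length_map, pvLinksOf_length path h2]; omega
    rw [pvTablesOf_getD_step _ _ hcl, PySem.Dict.getD_eq_get?_getD, pvTable_get?]
    rw [pvCandsOf_getD path ltrd i (by omega) h2]
    by_cases hm : r ∈ ltrd.getD (PySem.List.pyGetD path ((i : Nat) : Int) 0, PySem.List.pyGetD path (((i : Nat) : Int) + 1) 0) []
    · rw [if_pos hm]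
      rw [ih (i + 1) (by omega) r]
      rw [pvScanA_lt _ _ _ _ _ (by omega : i < path.length - 1), if_pos hm]
      simp [Option.getD]; omega
    · rw [if_neg hm]
      rw [pvScanA_lt _ _ _ _ _ (by omega : i < path.length - 1), if_neg hm]
      rfl

theorem pvTables_get?_scan (path : List Int) (ltrd : PySem.Dict (Int × Int) (List Int)) (h2 : 2 ≤ path.length)
    (i : Nat) (hi : i < path.length - 1) (r : Int) :
    ((pvTablesOf (pvCandsOf path ltrd)).getD i PySem.Dict.empty).get? r
      = if r ∈ (pvCandsOf path ltrd).getD i [] then some (pvScanA path ltrd path.length r i) else none := by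
  have hcl : i < (pvCandsOf path ltrd).length := by
    unfold pvCandsOf; rw [List.length_map, pvLinksOf_length path h2]; omega
  rw [pvTablesOf_getD_step _ _ hcl, pvTable_get?]
  by_cases hm : r ∈ (pvCandsOf path ltrd).getD i []
  · rw [if_pos hm, if_pos hm]
    rw [pvTables_getD_scan path ltrd h2 (path.length - 1 - (i+1)) (i+1) (by omega) r]
    rw [pvCandsOf_getD path ltrd i (by omega) h2] at hm
    rw [pvScanA_lt _ _ _ _ _ (by omega : i < path.length - 1), if_pos hm]
    congr 1; omega
  · rw [if_neg hm, if_neg hm]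



-- characterization of A's hysteresis selection fold: second component is the running max,
-- first component is `cur` if it attains the max, else the first candidate attaining it.
theorem pvSelFold_none (Lf : Int → Int) (cs : List Int) (b0 : Option Int) (m0 : Int) :
    cs.foldl (fun (bm : Option Int × Int) r =>
        if Lf r > bm.2 then (some r, Lf r)
        else if Lf r = bm.2 ∧ some r = (none : Option Int) then (some r, bm.2)
        else bm) (b0, m0)
      = (if m0 < cs.foldl (fun a r => max a (Lf r)) m0 then
           cs.find? (fun r => Lf r == cs.foldl (fun a r => max a (Lf r)) m0)
         else b0,
         cs.foldl (fun a r => max a (Lf r)) m0) := by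
  induction cs generalizing b0 m0 with
  | nil => simp
  | cons a cs ih =>
    simp only [List.foldl_cons]
    have hbase := (PySem.List.le_foldl_max_int cs Lf (max m0 (Lf a))).1
    by_cases h1 : Lf a > m0
    · rw [if_pos h1, ih]
      have hmax : max m0 (Lf a) = Lf a := by omega
      rw [hmax] at hbase ⊢
      by_cases h2 : Lf a < cs.foldl (fun a r => max a (Lf r)) (Lf a)
      · rw [if_pos h2, if_pos (by omega),
          List.find?_cons_of_neg (by simp; omega)]
      · rw [if_neg h2, if_pos (by omega),
          List.find?_cons_of_pos (by simp; omega)]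
    · rw [if_neg h1, if_neg (by simp), ih]
      have hmax : max m0 (Lf a) = m0 := by omega
      rw [hmax] at hbase ⊢
      by_cases h2 : m0 < cs.foldl (fun a r => max a (Lf r)) m0
      · rw [if_pos h2, if_pos h2, List.find?_cons_of_neg (by simp; omega)]
      · rw [if_neg h2, if_neg h2]

theorem pvSelFold_some (Lf : Int → Int) (q : Int) (cs : List Int) (b0 : Option Int) (m0 : Int) :
    cs.foldl (fun (bm : Option Int × Int) r =>
        if Lf r > bm.2 then (some r, Lf r)
        else if Lf r = bm.2 ∧ some r = some q then (some r, bm.2)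
        else bm) (b0, m0)
      = (if q ∈ cs ∧ Lf q = cs.foldl (fun a r => max a (Lf r)) m0 then some q
         else if m0 < cs.foldl (fun a r => max a (Lf r)) m0 then
           cs.find? (fun r => Lf r == cs.foldl (fun a r => max a (Lf r)) m0)
         else b0,
         cs.foldl (fun a r => max a (Lf r)) m0) := by
  induction cs generalizing b0 m0 with
  | nil => simp
  | cons a cs ih =>
    simp only [List.foldl_cons]
    have hbase := (PySem.List.le_foldl_max_int cs Lf (max m0 (Lf a))).1
    have hmem := (PySem.List.le_foldl_max_int cs Lf (max m0 (Lf a))).2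
    by_cases h1 : Lf a > m0
    · rw [if_pos h1, ih]
      have hmax : max m0 (Lf a) = Lf a := by omega
      rw [hmax] at hbase hmem ⊢
      by_cases hq : q ∈ cs ∧ Lf q = cs.foldl (fun a r => max a (Lf r)) (Lf a)
      · rw [if_pos hq, if_pos ⟨List.mem_cons_of_mem _ hq.1, hq.2⟩]
      · rw [if_neg hq]
        by_cases hq2 : q ∈ a :: cs ∧ Lf q = cs.foldl (fun a r => max a (Lf r)) (Lf a)
        · -- q attains the max but only as the head a: Lf a = max and q = a
          have hqa : q = a := by
            rcases List.mem_cons.mp hq2.1 with h | h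
            · exact h
            · exact absurd ⟨h, hq2.2⟩ hq
          rw [if_pos hq2]
          have hla : ¬ Lf a < cs.foldl (fun a r => max a (Lf r)) (Lf a) := by
            rw [← hq2.2, hqa]; omega
          rw [if_neg hla, hqa]
        · rw [if_neg hq2]
          by_cases hla : Lf a < cs.foldl (fun a r => max a (Lf r)) (Lf a)
          · rw [if_pos hla, if_pos (show m0 < cs.foldl (fun a r => max a (Lf r)) (Lf a) by omega),
              List.find?_cons_of_neg (by simp; omega)]
          · rw [if_neg hla, if_pos (show m0 < cs.foldl (fun a r => max a (Lf r)) (Lf a) by omega),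
              List.find?_cons_of_pos (by simp; omega)]
    · rw [if_neg h1]
      have hmax : max m0 (Lf a) = m0 := by omega
      by_cases h2 : Lf a = m0 ∧ (some a : Option Int) = some q
      · rw [if_pos h2, ih]
        have hqa : a = q := by simpa using h2.2
        rw [hmax] at hbase hmem ⊢
        by_cases hq : q ∈ cs ∧ Lf q = cs.foldl (fun a r => max a (Lf r)) m0
        · rw [if_pos hq, if_pos ⟨List.mem_cons_of_mem _ hq.1, hq.2⟩]
        · rw [if_neg hq]
          by_cases h3 : m0 < cs.foldl (fun a r => max a (Lf r)) m0
          · rw [if_pos h3]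
            have hq2 : ¬ (q ∈ a :: cs ∧ Lf q = cs.foldl (fun a r => max a (Lf r)) m0) := by
              rintro ⟨hmem2, heq⟩
              rcases List.mem_cons.mp hmem2 with h | h
              · subst hqa; rw [h2.1] at heq; omega
              · exact hq ⟨h, heq⟩
            rw [if_neg hq2, if_pos h3,
              List.find?_cons_of_neg (by simp; rw [h2.1]; omega)]
          · rw [if_neg h3]
            have hq2 : q ∈ a :: cs ∧ Lf q = cs.foldl (fun a r => max a (Lf r)) m0 := by
              refine ⟨by simp [hqa], ?_⟩
              subst hqa; rw [h2.1]; omega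
            rw [if_pos hq2, hqa]
      · rw [if_neg h2, ih]
        rw [hmax] at hbase hmem ⊢
        have hne : ¬ (Lf a = cs.foldl (fun a r => max a (Lf r)) m0 ∧ a = q) ∨ True := Or.inr trivial
        by_cases hq : q ∈ cs ∧ Lf q = cs.foldl (fun a r => max a (Lf r)) m0
        · rw [if_pos hq, if_pos ⟨List.mem_cons_of_mem _ hq.1, hq.2⟩]
        · rw [if_neg hq]
          have hq2 : ¬ (q ∈ a :: cs ∧ Lf q = cs.foldl (fun a r => max a (Lf r)) m0) := by
            rintro ⟨hmem2, heq⟩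
            rcases List.mem_cons.mp hmem2 with h | h
            · -- then Lf a = max ≤ ... : Lf a ≤ m0 ≤ max, so Lf a = m0 and a = q: tie branch
              subst h
              have : Lf q = m0 := by omega
              exact h2 ⟨this, rfl⟩
            · exact hq ⟨h, heq⟩
          rw [if_neg hq2]
          by_cases h3 : m0 < cs.foldl (fun a r => max a (Lf r)) m0
          · rw [if_pos h3, if_pos h3, List.find?_cons_of_neg (by simp; omega)]
          · rw [if_neg h3, if_neg h3]

theorem pvModify_append_append (d : PySem.Dict Int (List (Int × Int))) (k : Int) (xs ys : List (Int × Int)) :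
    (d.modify k [] (· ++ xs)).modify k [] (· ++ ys) = d.modify k [] (· ++ (xs ++ ys)) := by
  simp [PySem.Dict.modify, PySem.Dict.getD_insert_self, PySem.Dict.insert_insert_self,
    List.append_assoc]

-- A's inner consume loop over range(max_length) appends exactly the covered slice of links
theorem pvConsume (path : List Int) (h2 : 2 ≤ path.length) (best : Int) :
    ∀ (m : Nat), 1 ≤ m → ∀ (idx : Nat) (paths : PySem.Dict Int (List (Int × Int))),
      idx + m ≤ path.length - 1 →
      (List.range m).foldl (fun (st : PySem.Dict Int (List (Int × Int)) × Nat) _ =>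
          (st.1.modify best [] (· ++ [(PySem.List.pyGetD path (st.2 : Int) 0,
                                        PySem.List.pyGetD path ((st.2 : Int) + 1) 0)]), st.2 + 1))
        (paths, idx)
        = (paths.modify best [] (· ++ ((pvLinksOf path).drop idx).take m), idx + m) := by
  intro m
  induction m with
  | zero => omega
  | succ m ih =>
    intro _ idx paths hle
    have hLlen : (pvLinksOf path).length = path.length - 1 := pvLinksOf_length path h2
    have hidx : idx + m < (pvLinksOf path).length := by omega
    have hlink : (pvLinksOf path)[idx + m]'hidx
        = (PySem.List.pyGetD path (((idx + m : Nat)) : Int) 0,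
           PySem.List.pyGetD path ((((idx + m : Nat)) : Int) + 1) 0) :=
      pvLinksOf_getElem path (idx + m) (by omega) h2 hidx
    have htake : ((pvLinksOf path).drop idx).take (m + 1)
        = ((pvLinksOf path).drop idx).take m ++ [(pvLinksOf path)[idx + m]'hidx] := by
      rw [List.take_add_one]
      congr 1
      rw [List.getElem?_drop]
      simp [List.getElem?_eq_getElem hidx]
    cases Nat.eq_or_lt_of_le (show 1 ≤ m + 1 by omega) with
    | inl h1 =>
      -- m = 0 : a single iteration
      have hm0 : m = 0 := by omega
      subst hm0
      simp only [List.range_succ, List.range_zero, List.nil_append, List.foldl_cons,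
        List.foldl_nil, htake, List.take_zero, List.nil_append]
      rw [hlink]
      simp
    | inr h1 =>
      have hm1 : 1 ≤ m := by omega
      rw [List.range_succ, List.foldl_append, ih hm1 idx paths (by omega)]
      simp only [List.foldl_cons, List.foldl_nil]
      rw [pvModify_append_append, htake, hlink]
      simp [Nat.add_assoc]

theorem pvUsed_getLast (used : List Int) (best : Int) :
    (if used = [] ∨ used.getLast? ≠ some best then used ++ [best] else used).getLast?
      = some best := by
  split_ifs with h
  · exact List.getLast?_concat
  · rcases not_or.mp h with ⟨h1, h2⟩
    simpa using h2

-- the two main loops compute the same result from any state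
theorem pvLoopEq (path : List Int) (ltrd : PySem.Dict (Int × Int) (List Int)) (h2 : 2 ≤ path.length) :
    ∀ (fuel idx : Nat) (used : List Int) (paths : PySem.Dict Int (List (Int × Int))),
      pvLoopA path ltrd path.length fuel idx used paths
        = match pvSegs (pvCandsOf path ltrd) (pvTablesOf (pvCandsOf path ltrd)) (path.length - 1)
              fuel idx used.getLast? with
          | none => ([], [])
          | some segs =>
              (segs.foldl (fun u (seg : Int × Nat × Int) =>
                  if u = [] ∨ u.getLast? ≠ some seg.1 then u ++ [seg.1] else u) used,
               (segs.foldl (fun d (seg : Int × Nat × Int) => d.modify seg.1 []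
                   (· ++ PySem.List.slice (pvLinksOf path) (some (seg.2.1 : Int))
                       (some ((seg.2.1 : Int) + seg.2.2)))) paths).items) := by
  intro fuel
  induction fuel with
  | zero => intro idx used paths; rfl
  | succ fuel ih =>
    intro idx used paths
    rw [pvLoopA, pvSegs]
    by_cases hidx : idx < path.length - 1
    · simp only [hidx, if_true]
      have hC : ltrd.getD (PySem.List.pyGetD path (idx : Int) 0, PySem.List.pyGetD path ((idx : Int) + 1) 0) []
          = (pvCandsOf path ltrd).getD idx [] := (pvCandsOf_getD path ltrd idx hidx h2).symm
      rw [hC]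
      by_cases hce : (pvCandsOf path ltrd).getD idx [] = []
      · simp only [hce]
        rfl
      · simp only [if_neg hce]
        have hT : ∀ r : Int,
            ((pvTablesOf (pvCandsOf path ltrd)).getD idx PySem.Dict.empty).getD r 0
              = pvScanA path ltrd path.length r idx :=
          pvTables_getD_scan path ltrd h2 (path.length - 1 - idx) idx (by omega)
        simp only [hT]
        obtain ⟨a, cs, hc⟩ := List.exists_cons_of_ne_nil hce
        have hamem : a ∈ (pvCandsOf path ltrd).getD idx [] := by rw [hc]; exact List.mem_cons_self
        have hscan1 : 1 ≤ pvScanA path ltrd path.length a idx := by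
          rw [pvScanA_lt _ _ _ _ _ hidx, if_pos (by rw [hC]; exact hamem)]
          have := pvScanA_nonneg path ltrd path.length a (idx + 1)
          omega
        set mB := (PySem.List.max? (((pvCandsOf path ltrd).getD idx []).map
            (fun r => pvScanA path ltrd path.length r idx)) (fun x => x)).getD 0 with hmB
        set selA := ((pvCandsOf path ltrd).getD idx []).foldl (fun (bm : Option Int × Int) rid =>
            if pvScanA path ltrd path.length rid idx > bm.2 then (some rid, pvScanA path ltrd path.length rid idx)
            else if pvScanA path ltrd path.length rid idx = bm.2 ∧ some rid = used.getLast? then (some rid, bm.2)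
            else bm) ((none : Option Int), (-1 : Int)) with hselA
        have hm2 : mB = ((pvCandsOf path ltrd).getD idx []).foldl
            (fun acc r => max acc (pvScanA path ltrd path.length r idx)) (-1) := by
          rw [hmB, hc]
          simp only [List.map_cons, PySem.List.max?_id_cons, Option.getD_some, List.foldl_cons,
            List.foldl_map]
          congr 1
          omega
        have hMge : 1 ≤ mB := by
          rw [hm2, hc]
          simp only [List.foldl_cons]
          have := (PySem.List.le_foldl_max_int cs (fun r => pvScanA path ltrd path.length r idx)
            (max (-1) (pvScanA path ltrd path.length a idx))).1
          simp only at this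
          omega
        have hMle : mB ≤ ((path.length - 1 : Nat) : Int) - (idx : Int) := by
          rw [hm2, hc]
          simp only [List.foldl_cons]
          have hmax : max (-1 : Int) (pvScanA path ltrd path.length a idx)
              = pvScanA path ltrd path.length a idx := by omega
          rw [hmax, ← List.foldl_map]
          rcases PySem.List.foldl_max_mem (cs.map (fun r => pvScanA path ltrd path.length r idx))
              (pvScanA path ltrd path.length a idx) with h | h
          · rw [h]; exact pvScanA_le path ltrd path.length a idx (by omega)
          · obtain ⟨r, hr, hrr⟩ := List.mem_map.mp h
            rw [← hrr]
            exact pvScanA_le path ltrd path.length r idx (by omega)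
        have hsnd : selA.2 = mB := by
          rw [hselA]
          cases hcur : used.getLast? with
          | none =>
            rw [pvSelFold_none (fun r => pvScanA path ltrd path.length r idx), ← hm2]
          | some q =>
            rw [pvSelFold_some (fun r => pvScanA path ltrd path.length r idx) q, ← hm2]
        have hlast : (if used = [] ∨ used.getLast? ≠ some (selA.1.getD 0)
              then used ++ [selA.1.getD 0] else used).getLast? = some (selA.1.getD 0) :=
          pvUsed_getLast used (selA.1.getD 0)
        have hslice : PySem.List.slice (pvLinksOf path) (some ((idx : Nat) : Int))
              (some (((idx : Nat) : Int) + mB))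
            = ((pvLinksOf path).drop idx).take mB.toNat := by
          rw [PySem.List.slice_toNat (pvLinksOf path) (by omega) (by omega)]
          have hb : (((idx : Nat) : Int) + mB).toNat - ((idx : Nat) : Int).toNat = mB.toNat := by omega
          simp only [Int.toNat_natCast] at hb ⊢
          rw [hb]
        have hcons : (List.range selA.2.toNat).foldl
              (fun (st : PySem.Dict Int (List (Int × Int)) × Nat) _ =>
                (st.1.modify (selA.1.getD 0) [] (· ++ [(PySem.List.pyGetD path (st.2 : Int) 0,
                    PySem.List.pyGetD path ((st.2 : Int) + 1) 0)]), st.2 + 1)) (paths, idx)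
            = (paths.modify (selA.1.getD 0) [] (· ++ ((pvLinksOf path).drop idx).take mB.toNat),
               idx + mB.toNat) := by
          rw [hsnd]
          exact pvConsume path h2 (selA.1.getD 0) mB.toNat (by omega) idx paths (by omega)
        cases hcur : used.getLast? with
        | none =>
          have hbest : selA.1.getD 0
              = (((pvCandsOf path ltrd).getD idx []).find?
                  (fun r => pvScanA path ltrd path.length r idx == mB)).getD 0 := by
            rw [hselA, hcur, pvSelFold_none (fun r => pvScanA path ltrd path.length r idx), ← hm2]
            simp only [if_pos (show (-1 : Int) < mB by omega)]
          rw [hcur] at hlast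
          rw [hcons, ih, hlast]
          simp only []
          rw [← hbest]
          cases hseg : pvSegs (pvCandsOf path ltrd) (pvTablesOf (pvCandsOf path ltrd))
              (path.length - 1) fuel (idx + mB.toNat) (some (selA.1.getD 0)) with
          | none => rfl
          | some rest =>
            simp only [List.foldl_cons, hcur, hslice]
        | some q =>
          have hget : ((pvTablesOf (pvCandsOf path ltrd)).getD idx PySem.Dict.empty).get? q
              = if q ∈ (pvCandsOf path ltrd).getD idx [] then some (pvScanA path ltrd path.length q idx)
                else none :=
            pvTables_get?_scan path ltrd h2 idx hidx q
          have hbest : selA.1.getD 0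
              = (if ((pvTablesOf (pvCandsOf path ltrd)).getD idx PySem.Dict.empty).get? q = some mB then q
                 else (((pvCandsOf path ltrd).getD idx []).find?
                     (fun r => pvScanA path ltrd path.length r idx == mB)).getD 0) := by
            rw [hselA, hcur, pvSelFold_some (fun r => pvScanA path ltrd path.length r idx) q, ← hm2]
            by_cases hq : q ∈ (pvCandsOf path ltrd).getD idx [] ∧ pvScanA path ltrd path.length q idx = mB
            · rw [if_pos hq, hget, if_pos hq.1, hq.2, if_pos rfl]
              rfl
            · rw [if_neg hq, if_pos (show (-1 : Int) < mB by omega), hget]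
              by_cases hqc : q ∈ (pvCandsOf path ltrd).getD idx []
              · rw [if_pos hqc, if_neg (fun he => hq ⟨hqc, by simpa using he⟩)]
              · rw [if_neg hqc, if_neg (by simp)]
          rw [hcur] at hlast
          rw [hcons, ih, hlast]
          simp only []
          rw [← hbest]
          cases hseg : pvSegs (pvCandsOf path ltrd) (pvTablesOf (pvCandsOf path ltrd))
              (path.length - 1) fuel (idx + mB.toNat) (some (selA.1.getD 0)) with
          | none => rfl
          | some rest =>
            simp only [List.foldl_cons, hcur, hslice]
    · simp only [hidx, if_false]
      rfl

-- ===== VERDICT (by name: the statement is the Claim_ definition above) =====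
theorem reconstruct_path_structure_v1_spec : Claim_equal_reconstruct_path_structure_v1 := by
  unfold Claim_equal_reconstruct_path_structure_v1
  intro path_nodes link_to_routes _
  unfold Spec_reconstruct_path_structure_v1
  unfold reconstruct_path_structure_v1 reconstruct_path_structure_v1_alt
  by_cases h : path_nodes = [] ∨ PySem.List.len path_nodes < 2
  · rw [if_pos h, if_pos h]
  · rw [if_neg h, if_neg h]
    have h2 : 2 ≤ path_nodes.length := by
      rcases not_or.mp h with ⟨-, hlen⟩
      simp only [PySem.List.len] at hlen
      omega
    simp only []
    have hlinks : path_nodes.zip (PySem.List.slice path_nodes (some 1) none) = pvLinksOf path_nodes := rfl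
    have hcands : (pvLinksOf path_nodes).map (fun l => (pvLtrDict link_to_routes).getD l [])
        = pvCandsOf path_nodes (pvLtrDict link_to_routes) := rfl
    rw [hlinks, hcands, pvReachB_eq, pvLinksOf_length path_nodes h2,
      (show path_nodes.length - 1 + 1 = path_nodes.length by omega)]
    rw [pvLoopEq path_nodes (pvLtrDict link_to_routes) h2 path_nodes.length 0 [] PySem.Dict.empty]
    simp only [List.getLast?_nil]
    cases hseg : pvSegs (pvCandsOf path_nodes (pvLtrDict link_to_routes))
        (pvTablesOf (pvCandsOf path_nodes (pvLtrDict link_to_routes)))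
        (path_nodes.length - 1) path_nodes.length 0 none with
    | none => rfl
    | some segs =>
      simp only []
      unfold pvAssemble
      have hp := PySem.List.foldl_prod_mk
        (fun u (seg : Int × Nat × Int) =>
          if u = [] ∨ u.getLast? ≠ some seg.1 then u ++ [seg.1] else u)
        (fun d (seg : Int × Nat × Int) => d.modify seg.1 []
          (· ++ PySem.List.slice (pvLinksOf path_nodes) (some (seg.2.1 : Int))
              (some ((seg.2.1 : Int) + seg.2.2))))
        segs ([] : List Int) (PySem.Dict.empty : PySem.Dict Int (List (Int × Int)))
      simp only at hp
      rw [hp]
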